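-- pv_equiv track=rewrite | github.com/Srinath-N-Gudi/NumTextAlchemy | NumTextAlchemy/converter.py | __reverse_loop
-- ===== SOURCE A (Python) =====
-- __number_upper_set = {
--     "0": "",
--     "1": "one",
--     "2": "Twenty",
--     "3": "Thirty",
--     "4": "Forty",
--     "5": "Fifty",
--     "6": "Sixty",
--     "7": "Seventy",
--     "8": "Eighty",
--     "9": "Ninety",
-- }
--
-- __numbers_lower_set = {
--     "0": "",
--     "1": "one",
--     "2": "two",
--     "3": "three",
--     "4": "four",
--     "5": "five",
--     "6": "six",
--     "7": "seven",
--     "8": "eight",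
--     "9": "nine",
--     "10": "ten",
--     "11": "eleven",
--     "12": "twelve",
--     "13": "thirteen",
--     "14": "fourteen",
--     "15": "fifteen",
--     "16": "sixteen",
--     "17": "seventeen",
--     "18": "eighteen",
--     "19": "nineteen",
-- }
--
-- def __reverse_loop(num):
--
--     for key, value in __numbers_lower_set.items():
--         if value.lower() == num.lower():
--             return (key)
--
--     for key, value in __number_upper_set.items():
--         if value.lower() == num.lower():
--             return (key) + "0"
--
--
--
--     return None
-- ===== SOURCE B (Python) =====
-- # Single flat word list where the POSITION encodes the numeric value; the digit
-- # string is computed arithmetically with str(), not stored as dict keys.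
-- _WORDS = [
--     "", "one", "two", "three", "four", "five", "six", "seven", "eight", "nine",
--     "ten", "eleven", "twelve", "thirteen", "fourteen", "fifteen", "sixteen",
--     "seventeen", "eighteen", "nineteen",
--     "twenty", "thirty", "forty", "fifty", "sixty", "seventy", "eighty", "ninety",
-- ]
--
-- def __reverse_loop(num):
--     w = num.lower()
--     try:
--         i = _WORDS.index(w)
--     except ValueError:
--         return None
--     return str(i) if i < 20 else str((i - 18) * 10)
-- ===== Notes on version B (the rewrite author's own statement) =====
-- stated objective: alternative
-- what changed: B stores no key/value tables at all: one flat word list whose position encodes the numeric value, a single .index lookup, and the digit string is computed arithmetically with str(i) or str((i-18)*10) instead of returning stored dict keys with string concatenation.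
import Mathlib
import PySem

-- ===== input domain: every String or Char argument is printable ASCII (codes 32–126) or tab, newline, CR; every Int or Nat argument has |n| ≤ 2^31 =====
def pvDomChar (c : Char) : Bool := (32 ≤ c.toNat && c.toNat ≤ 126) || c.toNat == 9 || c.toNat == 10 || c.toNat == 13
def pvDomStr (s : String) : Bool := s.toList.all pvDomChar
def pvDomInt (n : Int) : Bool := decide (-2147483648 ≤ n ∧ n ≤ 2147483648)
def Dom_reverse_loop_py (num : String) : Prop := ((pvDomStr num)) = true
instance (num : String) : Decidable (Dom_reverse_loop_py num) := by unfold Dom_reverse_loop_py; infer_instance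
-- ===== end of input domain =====

-- B drops A's two key/value tables and staged scans: one flat word list whose position
-- encodes the value, a single .index lookup, and the digit string computed with str(); objective: alternative.

-- ===== PORT A =====
def numberUpperSet : List (String × String) :=
  [("0", ""), ("1", "one"), ("2", "Twenty"), ("3", "Thirty"), ("4", "Forty"),
   ("5", "Fifty"), ("6", "Sixty"), ("7", "Seventy"), ("8", "Eighty"), ("9", "Ninety")]

def numbersLowerSet : List (String × String) :=
  [("0", ""), ("1", "one"), ("2", "two"), ("3", "three"), ("4", "four"),
   ("5", "five"), ("6", "six"), ("7", "seven"), ("8", "eight"), ("9", "nine"),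
   ("10", "ten"), ("11", "eleven"), ("12", "twelve"), ("13", "thirteen"),
   ("14", "fourteen"), ("15", "fifteen"), ("16", "sixteen"), ("17", "seventeen"),
   ("18", "eighteen"), ("19", "nineteen")]

-- A's 'for key, value in …: if value.lower() == num.lower(): return key'
def scanA (num : String) : List (String × String) → Option String
  | [] => none
  | (k, v) :: rest =>
    if PySem.Str.lower v == PySem.Str.lower num then some k else scanA num rest

def reverse_loop_py (num : String) : Option String :=
  match scanA num numbersLowerSet with
  | some k => some k
  | none =>
    match scanA num numberUpperSet with
    | some k => some (k ++ "0")
    | none => none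

-- ===== PORT B =====
-- Source B's _WORDS: position encodes the numeric value
def wordsB : List String :=
  ["", "one", "two", "three", "four", "five", "six", "seven", "eight", "nine",
   "ten", "eleven", "twelve", "thirteen", "fourteen", "fifteen", "sixteen",
   "seventeen", "eighteen", "nineteen",
   "twenty", "thirty", "forty", "fifty", "sixty", "seventy", "eighty", "ninety"]

def reverse_loop_py_alt (num : String) : Option String :=
  match PySem.List.index? wordsB (PySem.Str.lower num) with
  | none => none
  | some i =>
    if i < 20 then some (PySem.Int.toStr (i : Int))
    else some (PySem.Int.toStr (((i : Int) - 18) * 10))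

-- ===== PRECONDITION & SPEC =====
def Spec_reverse_loop_py (num : String) (out : Option String) : Prop := out = reverse_loop_py_alt num
instance (num : String) (out : Option String) : Decidable (Spec_reverse_loop_py num out) := by unfold Spec_reverse_loop_py; infer_instance

-- ===== CLAIM (what is proved, stated in full; the proofs are below) =====
def Claim_equal_reverse_loop_py : Prop := ∀ (num : String), Dom_reverse_loop_py num → Spec_reverse_loop_py num (reverse_loop_py num)

-- ===== LEMMAS AND PROOFS =====

-- ===== VERDICT (by name: the statement is the Claim_ definition above) =====
set_option maxHeartbeats 16000000 in
theorem reverse_loop_py_spec : Claim_equal_reverse_loop_py := by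
  intro num _
  unfold Spec_reverse_loop_py reverse_loop_py reverse_loop_py_alt
  simp only [scanA, numbersLowerSet, numberUpperSet,
    show PySem.Str.lower "" = "" from by decide,
    show PySem.Str.lower "one" = "one" from by decide,
    show PySem.Str.lower "two" = "two" from by decide,
    show PySem.Str.lower "three" = "three" from by decide,
    show PySem.Str.lower "four" = "four" from by decide,
    show PySem.Str.lower "five" = "five" from by decide,
    show PySem.Str.lower "six" = "six" from by decide,
    show PySem.Str.lower "seven" = "seven" from by decide,
    show PySem.Str.lower "eight" = "eight" from by decide,
    show PySem.Str.lower "nine" = "nine" from by decide,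
    show PySem.Str.lower "ten" = "ten" from by decide,
    show PySem.Str.lower "eleven" = "eleven" from by decide,
    show PySem.Str.lower "twelve" = "twelve" from by decide,
    show PySem.Str.lower "thirteen" = "thirteen" from by decide,
    show PySem.Str.lower "fourteen" = "fourteen" from by decide,
    show PySem.Str.lower "fifteen" = "fifteen" from by decide,
    show PySem.Str.lower "sixteen" = "sixteen" from by decide,
    show PySem.Str.lower "seventeen" = "seventeen" from by decide,
    show PySem.Str.lower "eighteen" = "eighteen" from by decide,
    show PySem.Str.lower "nineteen" = "nineteen" from by decide,
    show PySem.Str.lower "Twenty" = "twenty" from by decide,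
    show PySem.Str.lower "Thirty" = "thirty" from by decide,
    show PySem.Str.lower "Forty" = "forty" from by decide,
    show PySem.Str.lower "Fifty" = "fifty" from by decide,
    show PySem.Str.lower "Sixty" = "sixty" from by decide,
    show PySem.Str.lower "Seventy" = "seventy" from by decide,
    show PySem.Str.lower "Eighty" = "eighty" from by decide,
    show PySem.Str.lower "Ninety" = "ninety" from by decide]
  generalize PySem.Str.lower num = t
  by_cases hmem : t ∈ wordsB
  · unfold wordsB at hmem
    fin_cases hmem <;> decide
  · have hnone : PySem.List.index? wordsB t = none :=
      (PySem.List.index?_eq_none_iff wordsB t).mpr hmem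
    rw [hnone]
    unfold wordsB at hmem
    simp only [List.mem_cons, List.not_mem_nil, or_false, not_or] at hmem
    obtain ⟨h0, h1, h2, h3, h4, h5, h6, h7, h8, h9, h10, h11, h12, h13, h14, h15, h16, h17, h18, h19, h20, h21, h22, h23, h24, h25, h26, h27⟩ := hmem
    have e0 : ("" == t) = false := beq_eq_false_iff_ne.mpr (fun e => h0 e.symm)
    have e1 : ("one" == t) = false := beq_eq_false_iff_ne.mpr (fun e => h1 e.symm)
    have e2 : ("two" == t) = false := beq_eq_false_iff_ne.mpr (fun e => h2 e.symm)
    have e3 : ("three" == t) = false := beq_eq_false_iff_ne.mpr (fun e => h3 e.symm)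
    have e4 : ("four" == t) = false := beq_eq_false_iff_ne.mpr (fun e => h4 e.symm)
    have e5 : ("five" == t) = false := beq_eq_false_iff_ne.mpr (fun e => h5 e.symm)
    have e6 : ("six" == t) = false := beq_eq_false_iff_ne.mpr (fun e => h6 e.symm)
    have e7 : ("seven" == t) = false := beq_eq_false_iff_ne.mpr (fun e => h7 e.symm)
    have e8 : ("eight" == t) = false := beq_eq_false_iff_ne.mpr (fun e => h8 e.symm)
    have e9 : ("nine" == t) = false := beq_eq_false_iff_ne.mpr (fun e => h9 e.symm)
    have e10 : ("ten" == t) = false := beq_eq_false_iff_ne.mpr (fun e => h10 e.symm)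
    have e11 : ("eleven" == t) = false := beq_eq_false_iff_ne.mpr (fun e => h11 e.symm)
    have e12 : ("twelve" == t) = false := beq_eq_false_iff_ne.mpr (fun e => h12 e.symm)
    have e13 : ("thirteen" == t) = false := beq_eq_false_iff_ne.mpr (fun e => h13 e.symm)
    have e14 : ("fourteen" == t) = false := beq_eq_false_iff_ne.mpr (fun e => h14 e.symm)
    have e15 : ("fifteen" == t) = false := beq_eq_false_iff_ne.mpr (fun e => h15 e.symm)
    have e16 : ("sixteen" == t) = false := beq_eq_false_iff_ne.mpr (fun e => h16 e.symm)
    have e17 : ("seventeen" == t) = false := beq_eq_false_iff_ne.mpr (fun e => h17 e.symm)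
    have e18 : ("eighteen" == t) = false := beq_eq_false_iff_ne.mpr (fun e => h18 e.symm)
    have e19 : ("nineteen" == t) = false := beq_eq_false_iff_ne.mpr (fun e => h19 e.symm)
    have e20 : ("twenty" == t) = false := beq_eq_false_iff_ne.mpr (fun e => h20 e.symm)
    have e21 : ("thirty" == t) = false := beq_eq_false_iff_ne.mpr (fun e => h21 e.symm)
    have e22 : ("forty" == t) = false := beq_eq_false_iff_ne.mpr (fun e => h22 e.symm)
    have e23 : ("fifty" == t) = false := beq_eq_false_iff_ne.mpr (fun e => h23 e.symm)
    have e24 : ("sixty" == t) = false := beq_eq_false_iff_ne.mpr (fun e => h24 e.symm)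
    have e25 : ("seventy" == t) = false := beq_eq_false_iff_ne.mpr (fun e => h25 e.symm)
    have e26 : ("eighty" == t) = false := beq_eq_false_iff_ne.mpr (fun e => h26 e.symm)
    have e27 : ("ninety" == t) = false := beq_eq_false_iff_ne.mpr (fun e => h27 e.symm)
    simp only [e0, e1, e2, e3, e4, e5, e6, e7, e8, e9, e10, e11, e12, e13, e14, e15, e16, e17, e18, e19, e20, e21, e22, e23, e24, e25, e26, e27, Bool.false_eq_true, reduceIte]
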